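-- pv_equiv track=rewrite | github.com/KL-Hsu/mathematical_modeling_of_complex_formation | Source code/Performance_comparison.py | owith_cwo
-- ===== SOURCE A (Python) =====
-- def owith_cwo(ls1, ls2):
--     n = 0
--     m = 0
--     t = 0
--     for i in range(100):
--         l1 = ls1[n:n+10]
--         l2 = ls2[n:n+10]
--         for j in l1:
--             for k in l2:
--                 if j[0] == 0 or k[0] == 0:
--                     t+=1
--                 else:
--                     if j[0]>k[0]:
--                         m+=1
--         n+=10
--
--     return m, t
-- ===== SOURCE B (Python) =====
-- from bisect import bisect_left
--
-- def owith_cwo(ls1, ls2):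
--     m = 0
--     t = 0
--     for s in range(0, 1000, 10):
--         l1 = ls1[s:s+10]
--         l2 = ls2[s:s+10]
--         if not l1 or not l2:
--             continue
--         nz1 = [v for v in (x[0] for x in l1) if v != 0]
--         nz2 = sorted(v for v in (x[0] for x in l2) if v != 0)
--         t += len(l1) * len(l2) - len(nz1) * len(nz2)
--         for v in nz1:
--             m += bisect_left(nz2, v)
--     return m, t
-- ===== Notes on version B (the rewrite author's own statement) =====
-- stated objective: alternative
-- what changed: Per 10-block, the nested all-pairs comparison loops are replaced by counting: t comes from the closed form len(l1)*len(l2) - nz1*nz2 over nonzero first elements, and m by sorting the nonzero first elements of the l2 block once and adding bisect_left counts for each nonzero first element of the l1 block.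
-- outside the precondition, e.g. on owith_cwo([[0]], [[]]): A returns (0, 1), B raises IndexError
import Mathlib
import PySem

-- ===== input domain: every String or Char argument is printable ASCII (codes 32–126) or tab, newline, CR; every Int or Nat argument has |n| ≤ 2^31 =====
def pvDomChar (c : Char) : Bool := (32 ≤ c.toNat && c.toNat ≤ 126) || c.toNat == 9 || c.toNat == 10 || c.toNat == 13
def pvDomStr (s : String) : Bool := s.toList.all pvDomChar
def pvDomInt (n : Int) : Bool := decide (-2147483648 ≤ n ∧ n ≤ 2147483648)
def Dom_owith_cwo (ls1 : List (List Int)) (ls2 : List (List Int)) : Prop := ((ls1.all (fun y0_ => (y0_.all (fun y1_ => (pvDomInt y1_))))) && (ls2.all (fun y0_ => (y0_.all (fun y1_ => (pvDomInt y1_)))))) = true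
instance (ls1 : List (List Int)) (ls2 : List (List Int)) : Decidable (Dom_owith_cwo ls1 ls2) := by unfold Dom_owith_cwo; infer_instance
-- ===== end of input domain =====

-- B replaces A's per-block all-pairs comparison loops by a counting formula for t and
-- sort + bisect_left for m (an alternative algorithm; no speed claim).

-- x[0] of an inner list (Pre_ guarantees every inner list whose first element is read is nonempty)
def pvHd (x : List Int) : Int := PySem.List.pyGetD x 0 0

-- ===== PORT A =====
def owith_cwo (ls1 : List (List Int)) (ls2 : List (List Int)) : Int × Int :=
  let st := (PySem.List.pyRange 0 100 1).foldl
    (fun (st : Int × Int × Int) (_i : Int) =>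
      let l1 := PySem.List.slice ls1 (some st.1) (some (st.1 + 10))
      let l2 := PySem.List.slice ls2 (some st.1) (some (st.1 + 10))
      let mt := l1.foldl
        (fun (mt : Int × Int) (j : List Int) =>
          l2.foldl
            (fun (mt : Int × Int) (k : List Int) =>
              if pvHd j = 0 ∨ pvHd k = 0 then (mt.1, mt.2 + 1)
              else if pvHd j > pvHd k then (mt.1 + 1, mt.2)
              else mt) mt)
        (st.2.1, st.2.2)
      (st.1 + 10, mt))
    ((0 : Int), (0 : Int), (0 : Int))
  (st.2.1, st.2.2)

-- ===== PORT B =====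
def owith_cwo_alt (ls1 : List (List Int)) (ls2 : List (List Int)) : Int × Int :=
  (PySem.List.pyRange 0 1000 10).foldl
    (fun (mt : Int × Int) (s : Int) =>
      let l1 := PySem.List.slice ls1 (some s) (some (s + 10))
      let l2 := PySem.List.slice ls2 (some s) (some (s + 10))
      if l1 = [] ∨ l2 = [] then mt
      else
        let nz1 := (l1.map pvHd).filter (fun v => decide (v ≠ 0))
        let nz2 := PySem.List.sorted ((l2.map pvHd).filter (fun v => decide (v ≠ 0))) (fun v => v) false
        let t := mt.2 + ((l1.length : Int) * (l2.length : Int) - (nz1.length : Int) * (nz2.length : Int))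
        let m := nz1.foldl (fun acc v => acc + (PySem.List.bisectLeft nz2 v : Int)) mt.1
        (m, t))
    ((0 : Int), (0 : Int))

-- ===== PRECONDITION & SPEC =====
-- Pre_ excludes inputs where a 10-element block reached by both slices contains an empty inner
-- list: there Python A raises IndexError unless the short-circuit of 'or' on a zero first
-- element skips the access, while B always reads every first element of such a block and raises.
def Pre_owith_cwo (ls1 : List (List Int)) (ls2 : List (List Int)) : Prop :=
  ∀ i : Nat, i < 100 →
    ((ls1.drop (10 * i)).take 10 ≠ [] ∧ (ls2.drop (10 * i)).take 10 ≠ []) →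
    ((∀ x ∈ (ls1.drop (10 * i)).take 10, x ≠ []) ∧ (∀ x ∈ (ls2.drop (10 * i)).take 10, x ≠ []))
instance (ls1 : List (List Int)) (ls2 : List (List Int)) : Decidable (Pre_owith_cwo ls1 ls2) := by
  unfold Pre_owith_cwo; infer_instance

def pvWitness_owith_cwo : List (List Int) × List (List Int) := ([[1], [0, 2]], [[2], [-1]])

def Spec_owith_cwo (ls1 : List (List Int)) (ls2 : List (List Int)) (out : Int × Int) : Prop := out = owith_cwo_alt ls1 ls2
instance (ls1 : List (List Int)) (ls2 : List (List Int)) (out : Int × Int) : Decidable (Spec_owith_cwo ls1 ls2 out) := by unfold Spec_owith_cwo; infer_instance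

-- ===== CLAIM (what is proved, stated in full; the proofs are below) =====
def Claim_equal_owith_cwo : Prop := ∀ (ls1 : List (List Int)) (ls2 : List (List Int)), Dom_owith_cwo ls1 ls2 → Pre_owith_cwo ls1 ls2 → Spec_owith_cwo ls1 ls2 (owith_cwo ls1 ls2)

-- ===== LEMMAS AND PROOFS =====

-- the two per-pair predicates behind A's inner branches
def pvTP (j k : List Int) : Bool := decide (pvHd j = 0 ∨ pvHd k = 0)
def pvMP (j k : List Int) : Bool := decide (¬(pvHd j = 0 ∨ pvHd k = 0) ∧ pvHd k < pvHd j)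

-- A's inner loop over l2, in closed form
theorem pv_innerA (l2 : List (List Int)) (j : List Int) (m t : Int) :
    l2.foldl
      (fun (mt : Int × Int) (k : List Int) =>
        if pvHd j = 0 ∨ pvHd k = 0 then (mt.1, mt.2 + 1)
        else if pvHd j > pvHd k then (mt.1 + 1, mt.2)
        else mt) (m, t)
    = (m + (l2.countP (pvMP j) : Int), t + (l2.countP (pvTP j) : Int)) := by
  induction l2 generalizing m t with
  | nil => simp
  | cons k l ih =>
    simp only [List.foldl_cons, List.countP_cons]
    by_cases h1 : pvHd j = 0 ∨ pvHd k = 0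
    · simp [ih, pvMP, pvTP, h1]
      ring
    · by_cases h2 : pvHd j > pvHd k
      · simp [ih, pvMP, pvTP, h1, h2]
        ring
      · simp [ih, pvMP, pvTP, h1, h2]

-- A's double loop over a block, in closed form
theorem pv_blockA (l1 l2 : List (List Int)) (m t : Int) :
    l1.foldl
      (fun (mt : Int × Int) (j : List Int) =>
        l2.foldl
          (fun (mt : Int × Int) (k : List Int) =>
            if pvHd j = 0 ∨ pvHd k = 0 then (mt.1, mt.2 + 1)
            else if pvHd j > pvHd k then (mt.1 + 1, mt.2)
            else mt) mt) (m, t)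
    = (m + (l1.map (fun j => (l2.countP (pvMP j) : Int))).sum,
       t + (l1.map (fun j => (l2.countP (pvTP j) : Int))).sum) := by
  induction l1 generalizing m t with
  | nil => simp
  | cons j l ih =>
    simp only [List.foldl_cons, List.map_cons, List.sum_cons, pv_innerA, ih, Prod.mk.injEq]
    constructor <;> ring

-- the t-sum in closed form: pairs*pairs minus nonzero*nonzero
theorem pv_tsum (l1 l2 : List (List Int)) :
    (l1.map (fun j => (l2.countP (pvTP j) : Int))).sum
    = (l1.length : Int) * (l2.length : Int)
      - (((l1.map pvHd).filter (fun v => decide (v ≠ 0))).length : Int)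
        * (((l2.map pvHd).filter (fun v => decide (v ≠ 0))).length : Int) := by
  have hc2 : ∀ (l2 : List (List Int)), ((l2.map pvHd).filter (fun v => decide (v ≠ 0))).length
      = l2.countP (fun k => decide (pvHd k ≠ 0)) := by
    intro l; rw [← List.countP_eq_length_filter, List.countP_map]; rfl
  have hper : ∀ j, (l2.countP (pvTP j) : Int)
      = if pvHd j = 0 then (l2.length : Int)
        else (l2.length : Int) - (l2.countP (fun k => decide (pvHd k ≠ 0)) : Int) := by
    intro j
    by_cases hj : pvHd j = 0
    · simp only [if_pos hj]
      have : l2.countP (pvTP j) = l2.length := by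
        rw [List.countP_eq_length]
        intro k _; simp [pvTP, hj]
      rw [this]
    · simp only [if_neg hj]
      have h1 : l2.countP (pvTP j) = l2.countP (fun k => decide (pvHd k = 0)) := by
        apply List.countP_congr; intro k _; simp [pvTP, hj]
      have h2 : l2.countP (fun k => decide (pvHd k = 0)) + l2.countP (fun k => decide (pvHd k ≠ 0)) = l2.length := by
        have := List.length_eq_countP_add_countP (l := l2) (p := fun k => decide (pvHd k = 0))
        rw [this]
        congr 1
        apply List.countP_congr; intro k _; simp
      rw [h1]; omega
  rw [hc2 l1, hc2 l2]
  induction l1 with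
  | nil => simp
  | cons j l ih =>
    simp only [List.map_cons, List.sum_cons, List.countP_cons, List.length_cons, ih, hper j]
    by_cases hj : pvHd j = 0
    · simp [pvHd] at *
      simp [hj]
      ring
    · have : (fun k => decide (pvHd k ≠ 0)) j = true := by simp [hj]
      simp only [if_neg hj, this]
      push_cast; ring

-- bisect_left on a sorted list counts the elements strictly below v
theorem pv_bisect_countP (xs : List Int) (v : Int) (h : xs.Pairwise (· ≤ ·)) :
    PySem.List.bisectLeft xs v = xs.countP (fun x => decide (x < v)) := by
  obtain ⟨hle, hlt, hge⟩ := PySem.List.bisectLeft_spec xs v h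
  set n := PySem.List.bisectLeft xs v with hn
  have hsplit : xs = xs.take n ++ xs.drop n := (List.take_append_drop n xs).symm
  have hlen : (xs.take n).length = n := by simp [hle]
  have hall : ∀ a ∈ xs.take n, (fun x => decide (x < v)) a = true := by
    intro a ha
    obtain ⟨i, hi, rfl⟩ := List.getElem_of_mem ha
    rw [List.getElem_take]
    have hi' : i < n := by omega
    simpa using hlt i (by omega) hi'
  have h1 : (xs.take n).countP (fun x => decide (x < v)) = n := by
    rw [List.countP_eq_length.mpr hall]; exact hlen
  have h2 : (xs.drop n).countP (fun x => decide (x < v)) = 0 := by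
    rw [List.countP_eq_zero]
    intro a ha
    obtain ⟨i, hi, rfl⟩ := List.getElem_of_mem ha
    rw [List.getElem_drop]
    have hlen2 : (xs.drop n).length = xs.length - n := by simp
    have hv := hge (n + i) (by omega) (by omega)
    simp; omega
  conv_rhs => rw [hsplit]
  rw [List.countP_append, h1, h2]
  omega

-- summing g over the nonzero elements only
theorem pv_sum_filter (ws : List Int) (g : Int → Int) :
    (ws.map (fun v => if v = 0 then 0 else g v)).sum
    = ((ws.filter (fun v => decide (v ≠ 0))).map g).sum := by
  induction ws with
  | nil => simp
  | cons w ws ih =>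
    by_cases hw : w = 0
    · simp [hw, ih]
    · simp [hw, ih]

-- the m-sum equals B's bisect sum
theorem pv_msum (l1 l2 : List (List Int)) :
    (l1.map (fun j => (l2.countP (pvMP j) : Int))).sum
    = (((l1.map pvHd).filter (fun v => decide (v ≠ 0))).map
        (fun v => (PySem.List.bisectLeft
          (PySem.List.sorted ((l2.map pvHd).filter (fun v => decide (v ≠ 0))) (fun v => v) false) v : Int))).sum := by
  set nz2 := (l2.map pvHd).filter (fun v => decide (v ≠ 0)) with hnz2
  set nz2s := PySem.List.sorted nz2 (fun v => v) false with hnz2s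
  have hsorted : nz2s.Pairwise (· ≤ ·) := by
    have := PySem.List.sorted_pairwise (xs := nz2) (key := fun v => v)
    simpa [hnz2s] using this
  have hper : ∀ j : List Int, (l2.countP (pvMP j) : Int)
      = if pvHd j = 0 then 0 else (PySem.List.bisectLeft nz2s (pvHd j) : Int) := by
    intro j
    by_cases hj : pvHd j = 0
    · simp only [if_pos hj]
      have : l2.countP (pvMP j) = 0 := by
        rw [List.countP_eq_zero]
        intro k _; simp [pvMP, hj]
      simp [this]
    · simp only [if_neg hj]
      have e1 : l2.countP (pvMP j) = l2.countP (fun k => decide (pvHd k < pvHd j) && decide (pvHd k ≠ 0)) := by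
        apply List.countP_congr; intro k _
        simp [pvMP, hj, and_comm]
      have e2 : l2.countP (fun k => decide (pvHd k < pvHd j) && decide (pvHd k ≠ 0))
          = nz2.countP (fun v => decide (v < pvHd j)) := by
        rw [hnz2, List.countP_filter, List.countP_map]; rfl
      have e3 : nz2.countP (fun v => decide (v < pvHd j)) = nz2s.countP (fun v => decide (v < pvHd j)) :=
        (List.Perm.countP_eq _ (PySem.List.sorted_perm nz2 (fun v => v) false)).symm
      rw [e1, e2, e3, ← pv_bisect_countP nz2s (pvHd j) hsorted]
  calc (l1.map (fun j => (l2.countP (pvMP j) : Int))).sum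
      = ((l1.map pvHd).map (fun v => if v = 0 then 0 else (PySem.List.bisectLeft nz2s v : Int))).sum := by
        rw [List.map_map]
        congr 1
        apply List.map_congr_left
        intro j _
        simpa using hper j
    _ = _ := by rw [pv_sum_filter]

-- iterate a per-block transformation over block starts n, n+10, …
def pvIter (f : Int → Int × Int → Int × Int) : Int → Nat → (Int × Int) → Int × Int
  | _, 0, mt => mt
  | n, c + 1, mt => pvIter f (n + 10) c (f n mt)

-- the per-block transformation performed by A on the pair of slices starting at n
def pvBlk (ls1 ls2 : List (List Int)) (n : Int) (mt : Int × Int) : Int × Int :=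
  (PySem.List.slice ls1 (some n) (some (n + 10))).foldl
    (fun (mt : Int × Int) (j : List Int) =>
      (PySem.List.slice ls2 (some n) (some (n + 10))).foldl
        (fun (mt : Int × Int) (k : List Int) =>
          if pvHd j = 0 ∨ pvHd k = 0 then (mt.1, mt.2 + 1)
          else if pvHd j > pvHd k then (mt.1 + 1, mt.2)
          else mt) mt) mt

theorem pv_foldA (ls1 ls2 : List (List Int)) (l : List Int) (n m t : Int) :
    l.foldl
      (fun (st : Int × Int × Int) (_i : Int) =>
        let l1 := PySem.List.slice ls1 (some st.1) (some (st.1 + 10))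
        let l2 := PySem.List.slice ls2 (some st.1) (some (st.1 + 10))
        let mt := l1.foldl
          (fun (mt : Int × Int) (j : List Int) =>
            l2.foldl
              (fun (mt : Int × Int) (k : List Int) =>
                if pvHd j = 0 ∨ pvHd k = 0 then (mt.1, mt.2 + 1)
                else if pvHd j > pvHd k then (mt.1 + 1, mt.2)
                else mt) mt)
          (st.2.1, st.2.2)
        (st.1 + 10, mt)) (n, m, t)
    = (n + 10 * l.length, pvIter (pvBlk ls1 ls2) n l.length (m, t)) := by
  induction l generalizing n m t with
  | nil => simp [pvIter]
  | cons x l ih =>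
    simp only [List.foldl_cons, List.length_cons, pvIter]
    rw [ih, Prod.mk.injEq]
    constructor
    · push_cast; ring
    · rfl

-- B's loop body equals A's per-block transformation
theorem pv_stepB_eq (ls1 ls2 : List (List Int)) (s : Int) (mt : Int × Int) :
    (let l1 := PySem.List.slice ls1 (some s) (some (s + 10))
     let l2 := PySem.List.slice ls2 (some s) (some (s + 10))
     if l1 = [] ∨ l2 = [] then mt
     else
       let nz1 := (l1.map pvHd).filter (fun v => decide (v ≠ 0))
       let nz2 := PySem.List.sorted ((l2.map pvHd).filter (fun v => decide (v ≠ 0))) (fun v => v) false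
       let t := mt.2 + ((l1.length : Int) * (l2.length : Int) - (nz1.length : Int) * (nz2.length : Int))
       let m := nz1.foldl (fun acc v => acc + (PySem.List.bisectLeft nz2 v : Int)) mt.1
       (m, t))
    = pvBlk ls1 ls2 s mt := by
  set l1 := PySem.List.slice ls1 (some s) (some (s + 10)) with hl1
  set l2 := PySem.List.slice ls2 (some s) (some (s + 10)) with hl2
  have hblk : pvBlk ls1 ls2 s mt
      = (mt.1 + (l1.map (fun j => (l2.countP (pvMP j) : Int))).sum,
         mt.2 + (l1.map (fun j => (l2.countP (pvTP j) : Int))).sum) := by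
    rw [pvBlk, ← hl1, ← hl2, ← pv_blockA l1 l2 mt.1 mt.2]
  by_cases hg : l1 = [] ∨ l2 = []
  · simp only [if_pos hg, hblk]
    rcases hg with h | h <;> simp [h]
  · simp only [if_neg hg, hblk]
    rw [PySem.List.foldl_add]
    have hlen : (PySem.List.sorted ((l2.map pvHd).filter (fun v => decide (v ≠ 0))) (fun v => v) false).length
        = ((l2.map pvHd).filter (fun v => decide (v ≠ 0))).length :=
      (PySem.List.sorted_perm _ _ _).length_eq
    rw [Prod.mk.injEq]
    constructor
    · rw [pv_msum l1 l2]
    · rw [pv_tsum l1 l2, hlen]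

theorem pv_foldB (ls1 ls2 : List (List Int)) (c : Nat) (n : Int) (mt : Int × Int) :
    (((List.range c).map (fun (k : Nat) => n + 10 * (k : Int))).foldl
      (fun (mt : Int × Int) (s : Int) =>
        let l1 := PySem.List.slice ls1 (some s) (some (s + 10))
        let l2 := PySem.List.slice ls2 (some s) (some (s + 10))
        if l1 = [] ∨ l2 = [] then mt
        else
          let nz1 := (l1.map pvHd).filter (fun v => decide (v ≠ 0))
          let nz2 := PySem.List.sorted ((l2.map pvHd).filter (fun v => decide (v ≠ 0))) (fun v => v) false
          let t := mt.2 + ((l1.length : Int) * (l2.length : Int) - (nz1.length : Int) * (nz2.length : Int))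
          let m := nz1.foldl (fun acc v => acc + (PySem.List.bisectLeft nz2 v : Int)) mt.1
          (m, t)) mt)
    = pvIter (pvBlk ls1 ls2) n c mt := by
  induction c generalizing n mt with
  | zero => simp [pvIter]
  | succ c ih =>
    rw [List.range_succ_eq_map, List.map_cons, List.map_map, List.foldl_cons]
    have hmap : ((List.range c).map ((fun (k : Nat) => n + 10 * (k : Int)) ∘ Nat.succ))
        = (List.range c).map (fun (k : Nat) => (n + 10) + 10 * (k : Int)) := by
      apply List.map_congr_left
      intro k _
      simp [Function.comp]
      ring
    rw [hmap, ih]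
    simp only [pvIter, Nat.cast_zero, mul_zero, add_zero]
    congr 1
    rw [← pv_stepB_eq ls1 ls2 n mt]

theorem pv_final (ls1 ls2 : List (List Int)) : owith_cwo ls1 ls2 = owith_cwo_alt ls1 ls2 := by
  have hA : owith_cwo ls1 ls2 = pvIter (pvBlk ls1 ls2) 0 (PySem.List.pyRange 0 100 1).length (0, 0) := by
    rw [owith_cwo, pv_foldA ls1 ls2]
  have hlen : (PySem.List.pyRange 0 100 1).length = 100 := by
    rw [PySem.List.length_pyRange_one]; rfl
  have hB : owith_cwo_alt ls1 ls2 = pvIter (pvBlk ls1 ls2) 0 100 (0, 0) := by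
    rw [owith_cwo_alt]
    have hr : PySem.List.pyRange 0 1000 10 = (List.range 100).map (fun (k : Nat) => (0 : Int) + 10 * (k : Int)) := by
      rw [PySem.List.pyRange_of_pos 0 1000 (by norm_num)]
      norm_num
      rfl
    rw [hr, pv_foldB ls1 ls2 100 0 ((0 : Int), (0 : Int))]
  rw [hA, hlen, hB]

-- ===== VERDICT (by name: the statement is the Claim_ definition above) =====
theorem owith_cwo_spec : Claim_equal_owith_cwo := by
  intro ls1 ls2 _ _
  unfold Spec_owith_cwo
  exact pv_final ls1 ls2
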